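-- pv_equiv track=rewrite | github.com/distbit0/Zettelkasten-to-Jekyll | invertBlockquotes.py | getSingleConvoBlockquote
-- ===== SOURCE A (Python) =====
-- def getSingleConvoBlockquote(text):
--     lines = text.split("\n")
--     start_index = None
--     end_index = None
--
--     for i, line in enumerate(lines):
--         if line.startswith(">"):
--             if start_index is None:
--                 start_index = i
--             end_index = i
--
--     if start_index is not None and end_index is not None:
--         return "\n".join(lines[start_index : end_index + 1]) + "\n"
--     else:
--         return ""
-- ===== SOURCE B (Python) =====
-- def getSingleConvoBlockquote(text):
--     lines = text.split("\n")
--     n = len(lines)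
--     first = None
--     for i, line in enumerate(lines):
--         if line.startswith(">"):
--             first = i
--             break
--     if first is None:
--         return ""
--     last = first
--     for j, line in enumerate(reversed(lines)):
--         if line.startswith(">"):
--             last = n - 1 - j
--             break
--     return "\n".join(lines[first:last + 1]) + "\n"
-- ===== Notes on version B (the rewrite author's own statement) =====
-- stated objective: alternative
-- what changed: A makes one full pass accumulating both the first and last blockquote indices; B does two short-circuiting scans (forward for the first match, backward over the reversed lines for the last) and breaks as soon as each is found.
import Mathlib
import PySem

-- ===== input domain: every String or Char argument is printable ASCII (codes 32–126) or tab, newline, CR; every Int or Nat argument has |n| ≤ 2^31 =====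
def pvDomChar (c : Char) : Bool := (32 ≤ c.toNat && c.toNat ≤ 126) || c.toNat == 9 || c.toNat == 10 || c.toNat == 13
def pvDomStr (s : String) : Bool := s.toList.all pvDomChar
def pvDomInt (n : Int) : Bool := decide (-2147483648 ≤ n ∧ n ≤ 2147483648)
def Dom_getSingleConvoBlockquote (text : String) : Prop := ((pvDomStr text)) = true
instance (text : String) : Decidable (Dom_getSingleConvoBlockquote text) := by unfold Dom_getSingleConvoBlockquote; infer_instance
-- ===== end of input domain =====

-- B replaces A's single accumulating pass with two short-circuiting scans (forward for the
-- first blockquote line, backward over the reversed lines for the last); alternative decomposition, same cost.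


-- ===== PORT A =====
def getSingleConvoBlockquote (text : String) : String :=
  let lines := PySem.Chars.splitOn text.toList ['\n']
  let st := (PySem.List.enumerate lines 0).foldl
      (fun (st : Option Int × Option Int) x =>
        if PySem.Chars.startswith x.2 ['>'] then (some (st.1.getD x.1), some x.1) else st)
      (none, none)
  match st.1, st.2 with
  | some s, some e =>
      String.ofList (PySem.Chars.join ['\n'] (PySem.List.slice lines (some s) (some (e + 1))) ++ ['\n'])
  | _, _ => ""

-- ===== PORT B =====
-- forward scan with break: first index ≥ i of a line starting with '>'
def altFindFw : List (List Char) → Int → Option Int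
  | [], _ => none
  | l :: ls, i => if PySem.Chars.startswith l ['>'] then some i else altFindFw ls (i + 1)

def getSingleConvoBlockquote_alt (text : String) : String :=
  let lines := PySem.Chars.splitOn text.toList ['\n']
  let n : Int := PySem.List.len lines
  match altFindFw lines 0 with
  | none => ""
  | some first =>
    let last :=
      match altFindFw lines.reverse 0 with
      | none => first
      | some j => n - 1 - j
    String.ofList (PySem.Chars.join ['\n'] (PySem.List.slice lines (some first) (some (last + 1))) ++ ['\n'])

-- ===== PRECONDITION & SPEC =====
def Spec_getSingleConvoBlockquote (text : String) (out : String) : Prop := out = getSingleConvoBlockquote_alt text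
instance (text : String) (out : String) : Decidable (Spec_getSingleConvoBlockquote text out) := by unfold Spec_getSingleConvoBlockquote; infer_instance

-- ===== CLAIM (what is proved, stated in full; the proofs are below) =====
def Claim_equal_getSingleConvoBlockquote : Prop := ∀ (text : String), Dom_getSingleConvoBlockquote text → Spec_getSingleConvoBlockquote text (getSingleConvoBlockquote text)

-- ===== LEMMAS AND PROOFS =====

-- last index ≥ k of a matching line, with default d (proof-side characterisation of A's fold)
def pvLastP : List (List Char) → Int → Int → Int
  | [], _, d => d
  | l :: ls, k, d => pvLastP ls (k + 1) (if PySem.Chars.startswith l ['>'] then k else d)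

theorem altFindFw_shift (ls : List (List Char)) : ∀ (k : Int),
    altFindFw ls k = (altFindFw ls 0).map (fun j => k + j) := by
  induction ls with
  | nil => intro k; simp [altFindFw]
  | cons l ls ih =>
    intro k
    by_cases h : PySem.Chars.startswith l ['>'] = true
    · simp [altFindFw, h]
    · simp only [altFindFw, h, if_neg, Bool.false_eq_true, not_false_iff]
      rw [ih (k + 1), ih (0 + 1)]
      cases altFindFw ls 0
      · simp
      · simp; ring

theorem altFindFw_none_iff (ls : List (List Char)) (k : Int) :
    altFindFw ls k = none ↔ ∀ l ∈ ls, PySem.Chars.startswith l ['>'] = false := by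
  induction ls generalizing k with
  | nil => simp [altFindFw]
  | cons l ls ih =>
    by_cases h : PySem.Chars.startswith l ['>'] = true
    · simp [altFindFw, h]
    · simp only [Bool.not_eq_true] at h
      simp [altFindFw, h, ih]

theorem foldA_some (ls : List (List Char)) : ∀ (k s e : Int),
    (PySem.List.enumerate ls k).foldl
      (fun (st : Option Int × Option Int) x =>
        if PySem.Chars.startswith x.2 ['>'] then (some (st.1.getD x.1), some x.1) else st)
      (some s, some e) = (some s, some (pvLastP ls k e)) := by
  induction ls with
  | nil => intro k s e; simp [PySem.List.enumerate_nil, pvLastP]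
  | cons l ls ih =>
    intro k s e
    rw [PySem.List.enumerate_cons]
    by_cases h : PySem.Chars.startswith l ['>'] = true
    · simp [List.foldl_cons, h, pvLastP, ih]
    · simp only [Bool.not_eq_true] at h
      simp [List.foldl_cons, h, pvLastP, ih]

theorem foldA_none (ls : List (List Char)) : ∀ (k : Int),
    (PySem.List.enumerate ls k).foldl
      (fun (st : Option Int × Option Int) x =>
        if PySem.Chars.startswith x.2 ['>'] then (some (st.1.getD x.1), some x.1) else st)
      (none, none) =
    (match altFindFw ls k with
     | none => ((none : Option Int), (none : Option Int))
     | some f => (some f, some (pvLastP ls k f))) := by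
  induction ls with
  | nil => intro k; simp [PySem.List.enumerate_nil, altFindFw]
  | cons l ls ih =>
    intro k
    rw [PySem.List.enumerate_cons]
    by_cases h : PySem.Chars.startswith l ['>'] = true
    · simp [List.foldl_cons, h, altFindFw, pvLastP, foldA_some]
    · simp only [Bool.not_eq_true] at h
      simp only [List.foldl_cons, h, if_neg, Bool.false_eq_true, not_false_iff, altFindFw,
        pvLastP, ih (k + 1)]

theorem pvLastP_append (ls : List (List Char)) (l : List Char) : ∀ (k d : Int),
    pvLastP (ls ++ [l]) k d =
      if PySem.Chars.startswith l ['>'] then k + ls.length else pvLastP ls k d := by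
  induction ls with
  | nil => intro k d; by_cases h : PySem.Chars.startswith l ['>'] = true <;> simp [pvLastP, h]
  | cons a ls ih =>
    intro k d
    simp only [List.cons_append, pvLastP, ih]
    by_cases h : PySem.Chars.startswith l ['>'] = true <;> simp [h] <;> push_cast <;> ring

theorem pvLastP_eq_back (ls : List (List Char)) : ∀ (k d : Int),
    pvLastP ls k d =
      match altFindFw ls.reverse 0 with
      | none => d
      | some j => k + ((ls.length : Int) - 1) - j := by
  induction ls using List.reverseRecOn with
  | nil => intro k d; simp [pvLastP, altFindFw]
  | append_singleton ls l ih =>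
    intro k d
    rw [pvLastP_append]
    by_cases h : PySem.Chars.startswith l ['>'] = true
    · rw [List.reverse_append]
      simp only [List.reverse_singleton, List.singleton_append, altFindFw, h, if_pos,
        List.length_append, List.length_cons, List.length_nil]
      push_cast; ring
    · simp only [Bool.not_eq_true] at h
      rw [List.reverse_append]
      simp only [List.reverse_singleton, List.singleton_append, altFindFw, h, if_neg,
        Bool.false_eq_true, not_false_iff]
      rw [altFindFw_shift ls.reverse (0 + 1), ih k d]
      cases hj : altFindFw ls.reverse 0 with
      | none => simp
      | some j =>
        simp
        push_cast; ring

theorem bodies_eq (lines : List (List Char)) :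
    (let st := (PySem.List.enumerate lines 0).foldl
        (fun (st : Option Int × Option Int) x =>
          if PySem.Chars.startswith x.2 ['>'] then (some (st.1.getD x.1), some x.1) else st)
        (none, none)
     match st.1, st.2 with
     | some s, some e =>
         String.ofList (PySem.Chars.join ['\n'] (PySem.List.slice lines (some s) (some (e + 1))) ++ ['\n'])
     | _, _ => "") =
    (let n : Int := PySem.List.len lines
     match altFindFw lines 0 with
     | none => ""
     | some first =>
       let last :=
         match altFindFw lines.reverse 0 with
         | none => first
         | some j => n - 1 - j
       String.ofList (PySem.Chars.join ['\n'] (PySem.List.slice lines (some first) (some (last + 1))) ++ ['\n'])) := by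
  simp only [foldA_none]
  cases hf : altFindFw lines 0 with
  | none => simp
  | some f =>
    simp only []
    rw [pvLastP_eq_back]
    cases hb : altFindFw lines.reverse 0 with
    | none =>
      exfalso
      rw [altFindFw_none_iff] at hb
      have : altFindFw lines 0 = none := by
        rw [altFindFw_none_iff]; intro l hl; exact hb l (by simpa using hl)
      simp [this] at hf
    | some j =>
      simp [PySem.List.len_eq]

-- ===== VERDICT (by name: the statement is the Claim_ definition above) =====
theorem getSingleConvoBlockquote_spec : Claim_equal_getSingleConvoBlockquote := by
  intro text _
  unfold Spec_getSingleConvoBlockquote getSingleConvoBlockquote getSingleConvoBlockquote_alt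
  exact bodies_eq (PySem.Chars.splitOn text.toList ['\n'])
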